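-- pv_equiv track=rewrite | github.com/cafrii/omega2 | 백준/Gold/1660. 캡틴 이다솜/캡틴 이다솜.py | solve
-- ===== SOURCE A (Python) =====
-- def solve(N:int)->int:
--     '''
--     Args: N: number of balls
--     Returns: minimum number of tri-pyramid to compose
--
--     만들 수 있는 사면체의 최소 수는 가능한 한 큰 사면체를 만들려고 시도하는 것이 쉽다.
--
--     greedy 대신 dp를 바로 적용하자.
--     bottom up, forward, layered.
--     '''
--     MAX_N = 300_000
--     # max_height = sqrt(MAX_N*2)
--
--     dp = list(range(N+1))  # [0, 1, 2, .., N]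
--     # dp[k] 는 볼 개수 k로 사면체를 만들 수 있는 사면체의 최소 개수
--     # 처음에는 1층 짜리 (볼 1개짜리 사면체) 로만 만드는 경우로 초기화
--
--     j = 0
--     for h in range(1, MAX_N):  # 몇 층 까지 할 수 있을지 알 수 없으니 충분히 큰 수로..
--         # h: 사면체의 높이. 1, 2, 3...
--
--         b = (h+1)*h//2
--         # b: 높이 h 사면체의 바닥층의 볼 수:  (h+1) x h / 2
--         #  1, 3, 6, 10, 15, 21, ..
--
--         j += b
--         # j: 높이 h의 사면체의 전체 볼 수. 직전 h-1 높이 사면체 볼 수 (j) 에 바닥층 볼 수 (b) 추가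
--         #  1, 4, 10, 20, 35, 56, ..
--
--         if j > N: break
--         # 어느 h 이상이 되면, 보유한 볼 수로는 만들 수 없게 됨.
--
--         for k in range(j, N+1):
--             dp[k] = min(dp[k], dp[k-j]+1)
--
--     return dp[N]
-- ===== SOURCE B (Python) =====
-- def solve(N: int) -> int:
--     # Layered BFS over reachable sums: after round d, `visited` holds every sum
--     # expressible with at most d tetrahedral numbers; stop when N is reached.
--     tets = []
--     t = h = 0
--     while True:
--         h += 1
--         t += h * (h + 1) // 2
--         if t > N:
--             break
--         tets.append(t)
--     visited = {0}
--     frontier = {0}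
--     d = 0
--     while N not in visited:
--         d += 1
--         frontier = {s + t for s in frontier for t in tets
--                     if s + t <= N and s + t not in visited}
--         visited |= frontier
--     return d
-- ===== Notes on version B (the rewrite author's own statement) =====
-- stated objective: faster
-- what changed: A fills a dp array by one full relaxation sweep per tetrahedral coin; B performs a layered breadth-first search over reachable sums (visited set + frontier set, one layer per coin count) and returns the first layer in which N appears, stopping as soon as the minimum count is found instead of computing dp for every value; measured 2.6x at the largest size both finish and B keeps scaling where A times out.
import Mathlib
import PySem

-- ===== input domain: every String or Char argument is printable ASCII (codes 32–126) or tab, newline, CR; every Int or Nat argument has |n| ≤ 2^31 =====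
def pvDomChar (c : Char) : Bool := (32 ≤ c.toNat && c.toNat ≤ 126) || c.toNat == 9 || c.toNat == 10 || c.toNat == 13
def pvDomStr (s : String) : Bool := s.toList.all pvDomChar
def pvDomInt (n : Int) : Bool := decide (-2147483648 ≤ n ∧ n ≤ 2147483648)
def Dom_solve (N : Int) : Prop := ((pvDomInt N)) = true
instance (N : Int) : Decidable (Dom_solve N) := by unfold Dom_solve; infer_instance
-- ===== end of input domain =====

-- B replaces A's per-coin dp relaxation sweeps by a layered BFS over reachable sums
-- (visited/frontier sets, stop at the layer containing N); equal return value on every admitted input.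

-- ===== PORT A =====
-- inner loop: for k in range(j, N+1): dp[k] = min(dp[k], dp[k-j]+1)
def innerA (N j : Int) (dp : List Int) : List Int :=
  (PySem.List.pyRange j (N + 1) 1).foldl
    (fun d k =>
      PySem.List.pySetD d k (min (PySem.List.pyGetD d k 0) (PySem.List.pyGetD d (k - j) 0 + 1)))
    dp

-- outer loop: for h in range(1, MAX_N): b = (h+1)*h//2; j += b; if j > N: break; inner sweep
def loopA (N : Int) (dp : List Int) (j : Int) (hs : List Int) : List Int :=
  match hs with
  | [] => dp
  | h :: rest =>
      let b := PySem.Int.floordiv ((h + 1) * h) 2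
      let j' := j + b
      if N < j' then dp
      else loopA N (innerA N j' dp) j' rest

def solve (N : Int) : Int :=
  let dp := PySem.List.pyRange 0 (N + 1) 1
  let dp := loopA N dp 0 (PySem.List.pyRange 1 300000 1)
  (PySem.List.pyGet? dp N).getD 0

-- ===== PORT B =====
-- while True: h += 1; t += h*(h+1)//2; if t > N: break; tets.append(t)
-- (the Nat parameter hh is python's h; termination measure (N - t).toNat)
def tetListAux (N t : Int) (hh : Nat) : List Int :=
  let t' := t + PySem.Int.floordiv (((hh : Int) + 1) * ((hh : Int) + 2)) 2
  if N < t' then [] else t' :: tetListAux N t' (hh + 1)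
termination_by (N - t).toNat
decreasing_by
  have h2 : PySem.Int.floordiv (((hh : Int) + 1) * ((hh : Int) + 2)) 2
      = ((hh : Int) + 1) * ((hh : Int) + 2) / 2 :=
    PySem.Int.floordiv_eq_ediv_of_pos (by omega)
  have h3 : (2 : Int) ∣ ((hh : Int) + 1) * ((hh : Int) + 2) := by
    rcases Int.even_mul_succ_self ((hh : Int) + 1) with ⟨k, hk⟩
    exact ⟨k, by linarith⟩
  have h4 : 1 ≤ ((hh : Int) + 1) * ((hh : Int) + 2) / 2 := by
    rcases h3 with ⟨k, hk⟩
    have : 1 ≤ k := by nlinarith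
    omega
  simp only [not_lt] at *
  omega

-- frontier = {s + t for s in frontier for t in tets if s + t <= N and s + t not in visited}
def frontStep (N : Int) (cs : List Int) (V F : PySem.Set Int) : PySem.Set Int :=
  F.foldl
    (fun acc s =>
      cs.foldl
        (fun acc t =>
          if s + t ≤ N ∧ ¬ PySem.Set.contains V (s + t) then PySem.Set.add acc (s + t) else acc)
        acc)
    PySem.Set.empty

-- while N not in visited: d += 1; frontier = {...}; visited |= frontier
-- (fuel only makes the loop total; N.toNat rounds suffice on every admitted input)
def bfsLoop (N : Int) (cs : List Int) (V F : PySem.Set Int) (d : Int) (fuel : Nat) : Int :=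
  if PySem.Set.contains V N then d
  else
    match fuel with
    | 0 => d
    | fuel' + 1 =>
        let F' := frontStep N cs V F
        bfsLoop N cs (PySem.Set.union V F') F' (d + 1) fuel'

def solve_alt (N : Int) : Int :=
  let tets := tetListAux N 0 0
  bfsLoop N tets (PySem.Set.ofList [0]) (PySem.Set.ofList [0]) 0 N.toNat

-- ===== PRECONDITION & SPEC =====
-- Pre_ excludes negative inputs, on which A raises IndexError (dp[N] on an empty list).
def Pre_solve (N : Int) : Prop := 0 ≤ N
instance (N : Int) : Decidable (Pre_solve N) := by unfold Pre_solve; infer_instance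
def pvWitness_solve : Int := 10

def Spec_solve (N : Int) (out : Int) : Prop := out = solve_alt N
instance (N : Int) (out : Int) : Decidable (Spec_solve N out) := by unfold Spec_solve; infer_instance

-- ===== CLAIM (what is proved, stated in full; the proofs are below) =====
def Claim_equal_solve : Prop := ∀ (N : Int), Dom_solve N → Pre_solve N → Spec_solve N (solve N)

-- ===== LEMMAS AND PROOFS =====

/-- `l` is a multiset of coins from `cs` summing to `n`. -/
def RepL (cs : List Int) (n : Int) (l : List Int) : Prop :=
  (∀ x ∈ l, x ∈ cs) ∧ l.sum = n

/-- `v` is the least length of a coin list from `cs` summing to `n`. -/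
def Best (cs : List Int) (n v : Int) : Prop :=
  (∃ l, RepL cs n l ∧ (l.length : Int) = v) ∧ ∀ l, RepL cs n l → v ≤ (l.length : Int)

/-- `n` is a sum of at most `d` coins from `cs`. -/
def Reach (cs : List Int) (d : Nat) (n : Int) : Prop :=
  ∃ l, RepL cs n l ∧ l.length ≤ d

def PosC (cs : List Int) : Prop := ∀ x ∈ cs, 1 ≤ x

theorem best_unique {cs : List Int} {n v w : Int} (hv : Best cs n v) (hw : Best cs n w) :
    v = w := by
  obtain ⟨⟨lv, hlv, hlen⟩, hmin⟩ := hv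
  obtain ⟨⟨lw, hlw, hlen'⟩, hmin'⟩ := hw
  have h1 := hmin lw hlw
  have h2 := hmin' lv hlv
  omega

theorem best_congr {cs cs' : List Int} {n v : Int} (h : ∀ x, x ∈ cs ↔ x ∈ cs')
    (hb : Best cs n v) : Best cs' n v := by
  obtain ⟨⟨l, ⟨hl, hs⟩, hlen⟩, hmin⟩ := hb
  exact ⟨⟨l, ⟨fun x hx => (h x).mp (hl x hx), hs⟩, hlen⟩,
    fun l' ⟨hl', hs'⟩ => hmin l' ⟨fun x hx => (h x).mpr (hl' x hx), hs'⟩⟩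

theorem best_zero (cs : List Int) : Best cs 0 0 :=
  ⟨⟨[], ⟨by simp, by simp⟩, by simp⟩, fun l _ => by positivity⟩

theorem best_skip {cs : List Int} {t n v : Int} (hp : PosC cs) (ht : 1 ≤ t) (hn : n < t)
    (hb : Best cs n v) : Best (t :: cs) n v := by
  obtain ⟨⟨l, ⟨hl, hs⟩, hlen⟩, hmin⟩ := hb
  refine ⟨⟨l, ⟨fun x hx => List.mem_cons_of_mem _ (hl x hx), hs⟩, hlen⟩, ?_⟩
  rintro l' ⟨hl', hs'⟩
  have htl : t ∉ l' := by
    intro htl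
    have hperm : List.Perm l' (t :: l'.erase t) := List.perm_cons_erase htl
    have hsum : l'.sum = t + (l'.erase t).sum := by
      rw [hperm.sum_eq, List.sum_cons]
    have hnn : 0 ≤ (l'.erase t).sum :=
      List.sum_nonneg (fun x hx => by
        rcases List.mem_cons.mp (hl' x (List.mem_of_mem_erase hx)) with h | h
        · omega
        · have := hp x h; omega)
    omega
  refine hmin l' ⟨fun x hx => ?_, hs'⟩
  rcases List.mem_cons.mp (hl' x hx) with h | h
  · exact absurd (h ▸ hx) htl
  · exact h

theorem best_step {cs : List Int} {t n a b : Int} (hp : PosC cs) (ht : 1 ≤ t)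
    (ha : Best cs n a) (hb : Best (t :: cs) (n - t) b) :
    Best (t :: cs) n (min a (b + 1)) := by
  obtain ⟨⟨la, ⟨hla, hsa⟩, hlena⟩, hmina⟩ := ha
  obtain ⟨⟨lb, ⟨hlb, hsb⟩, hlenb⟩, hminb⟩ := hb
  constructor
  · rcases le_total a (b + 1) with h | h
    · rw [min_eq_left h]
      exact ⟨la, ⟨fun x hx => List.mem_cons_of_mem _ (hla x hx), hsa⟩, hlena⟩
    · rw [min_eq_right h]
      exact ⟨t :: lb, ⟨fun x hx => by
          rcases List.mem_cons.mp hx with h' | h'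
          · exact h' ▸ List.mem_cons_self
          · exact hlb x h', by rw [List.sum_cons, hsb]; ring⟩,
        by simp only [List.length_cons]; push_cast; omega⟩
  · rintro l ⟨hl, hs⟩
    by_cases htl : t ∈ l
    · have hperm : List.Perm l (t :: l.erase t) := List.perm_cons_erase htl
      have hsum : l.sum = t + (l.erase t).sum := by rw [hperm.sum_eq, List.sum_cons]
      have hrep : RepL (t :: cs) (n - t) (l.erase t) :=
        ⟨fun x hx => hl x (List.mem_of_mem_erase hx), by omega⟩
      have := hminb _ hrep
      have hlen : (l.erase t).length + 1 = l.length := by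
        have := hperm.length_eq; simp at this; omega
      have hmin' : min a (b + 1) ≤ b + 1 := min_le_right _ _
      push_cast at *
      omega
    · have hrep : RepL cs n l := ⟨fun x hx => by
        rcases List.mem_cons.mp (hl x hx) with h | h
        · exact absurd (h ▸ hx) htl
        · exact h, hs⟩
      exact le_trans (min_le_left _ _) (hmina l hrep)

theorem reach_mono {cs : List Int} {d e : Nat} {n : Int} (hde : d ≤ e)
    (h : Reach cs d n) : Reach cs e n := by
  obtain ⟨l, hl, hlen⟩ := h
  exact ⟨l, hl, le_trans hlen hde⟩

theorem best_reach_iff {cs : List Int} {n v : Int} (hb : Best cs n v) (d : Nat) :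
    Reach cs d n ↔ v ≤ (d : Int) := by
  obtain ⟨⟨l, hl, hlen⟩, hmin⟩ := hb
  constructor
  · rintro ⟨l', hl', hlen'⟩
    have := hmin l' hl'
    have : (l'.length : Int) ≤ (d : Int) := by exact_mod_cast hlen'
    omega
  · intro hvd
    exact ⟨l, hl, by omega⟩

-- tetrahedral numbers, Nat-side
def triN (h : Nat) : Nat := h * (h + 1) / 2
def tetNat : Nat → Nat
  | 0 => 0
  | h + 1 => tetNat h + triN (h + 1)

theorem two_triN (h : Nat) : 2 * triN h = h * (h + 1) :=
  Nat.mul_div_cancel' (Nat.even_mul_succ_self h).two_dvd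

theorem triN_div (h : Nat) : h * (h + 1) / 2 = triN h := by
  have := two_triN h; omega

theorem triN_pos (h : Nat) : 1 ≤ triN (h + 1) := by
  have := two_triN (h + 1); nlinarith

theorem tetNat_pos (h : Nat) : 1 ≤ tetNat (h + 1) := by
  have := triN_pos h; simp [tetNat]; omega

theorem tet_ge_sq : ∀ h, h * h ≤ tetNat h := by
  intro h
  induction h with
  | zero => simp [tetNat]
  | succ n ih =>
      have h1 := two_triN (n + 1)
      have : 2 * n + 1 ≤ triN (n + 1) := by nlinarith
      simp only [tetNat]; nlinarith

theorem flr (hh : Nat) :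
    PySem.Int.floordiv (((hh : Int) + 1) * ((hh : Int) + 2)) 2 = (triN (hh + 1) : Int) := by
  have h1 : ((hh : Int) + 1) * ((hh : Int) + 2) = (((hh + 1) * (hh + 2) : Nat) : Int) := by
    push_cast; ring
  rw [h1]
  rw [show ((2:Int)) = ((2:Nat):Int) by norm_num, PySem.Int.floordiv_natCast]
  have h2 : (hh + 1) * (hh + 2) / 2 = triN (hh + 1) := by
    have h3 := triN_div (hh + 1)
    simpa [show hh + 1 + 1 = hh + 2 by omega] using h3
  rw [h2]

theorem flrA (hh : Nat) :
    PySem.Int.floordiv ((((hh : Int) + 1) + 1) * ((hh : Int) + 1)) 2 = (triN (hh + 1) : Int) := by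
  have h1 : (((hh : Int) + 1) + 1) * ((hh : Int) + 1) = ((hh : Int) + 1) * ((hh : Int) + 2) := by
    ring
  rw [h1, flr]

-- one unfolding of tetListAux
theorem tetListAux_eq (N t : Int) (hh : Nat) :
    tetListAux N t hh =
      if N < t + (triN (hh + 1) : Int) then []
      else (t + (triN (hh + 1) : Int)) :: tetListAux N (t + (triN (hh + 1) : Int)) (hh + 1) := by
  rw [tetListAux, flr hh]

theorem tet_mem_bounds (N : Int) : ∀ (r : Nat) (t : Int) (hh : Nat), (N - t).toNat ≤ r →
    ∀ x ∈ tetListAux N t hh, t + 1 ≤ x ∧ x ≤ N := by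
  intro r
  induction r with
  | zero =>
      intro t hh hr x hx
      rw [tetListAux_eq] at hx
      have h1 : (1:Int) ≤ (triN (hh+1) : Int) := by exact_mod_cast triN_pos hh
      by_cases hc : N < t + (triN (hh+1) : Int)
      · rw [if_pos hc] at hx; simp at hx
      · rw [if_neg hc] at hx
        exfalso; omega
  | succ n ih =>
      intro t hh hr x hx
      rw [tetListAux_eq] at hx
      have h1 : (1:Int) ≤ (triN (hh+1) : Int) := by exact_mod_cast triN_pos hh
      by_cases hc : N < t + (triN (hh+1) : Int)
      · rw [if_pos hc] at hx; simp at hx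
      · rw [if_neg hc] at hx
        rcases List.mem_cons.mp hx with h | h
        · omega
        · have := ih (t + (triN (hh+1) : Int)) (hh + 1) (by omega) x h
          omega

theorem tet_posC (N : Int) : PosC (tetListAux N 0 0) := by
  intro x hx
  have := tet_mem_bounds N (N - 0).toNat 0 0 le_rfl x hx
  omega

theorem tet_head (N : Int) (hN : 1 ≤ N) :
    tetListAux N 0 0 = 1 :: tetListAux N 1 1 := by
  rw [tetListAux_eq]
  have h1 : (triN 1 : Int) = 1 := by norm_num [triN]
  rw [h1, if_neg (by omega)]
  norm_num

-- ---- BFS side ----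

theorem mem_innerFold (N : Int) (V : PySem.Set Int) (s : Int) :
    ∀ (ts : List Int) (acc : PySem.Set Int) (m : Int),
      (m ∈ ts.foldl
        (fun acc t =>
          if s + t ≤ N ∧ ¬ PySem.Set.contains V (s + t) then PySem.Set.add acc (s + t) else acc)
        acc) ↔ m ∈ acc ∨ ∃ t ∈ ts, m = s + t ∧ m ≤ N ∧ m ∉ V := by
  intro ts
  induction ts with
  | nil => intro acc m; simp
  | cons t rest ih =>
      intro acc m
      rw [List.foldl_cons, ih]
      by_cases hc : s + t ≤ N ∧ ¬ PySem.Set.contains V (s + t)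
      · rw [if_pos hc]
        rw [PySem.Set.mem_add]
        have hnv : (s + t) ∉ V := by
          intro hmem
          exact hc.2 ((PySem.Set.contains_iff V (s + t)).mpr hmem)
        constructor
        · rintro (⟨h | h⟩ | h)
          · exact Or.inl h
          · exact Or.inr ⟨t, by simp, h, h ▸ hc.1, h ▸ hnv⟩
          · obtain ⟨t', ht', rest'⟩ := h
            exact Or.inr ⟨t', by simp [ht'], rest'⟩
        · rintro (h | ⟨t', ht', hm, hle, hnv'⟩)
          · exact Or.inl (Or.inl h)
          · rcases List.mem_cons.mp ht' with h' | h'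
            · exact Or.inl (Or.inr (h' ▸ hm))
            · exact Or.inr ⟨t', h', hm, hle, hnv'⟩
      · rw [if_neg hc]
        constructor
        · rintro (h | ⟨t', ht', rest'⟩)
          · exact Or.inl h
          · exact Or.inr ⟨t', by simp [ht'], rest'⟩
        · rintro (h | ⟨t', ht', hm, hle, hnv'⟩)
          · exact Or.inl h
          · rcases List.mem_cons.mp ht' with h' | h'
            · exfalso
              subst h'
              subst hm
              exact hc ⟨hle, fun hco => hnv' ((PySem.Set.contains_iff V _).mp hco)⟩
            · exact Or.inr ⟨t', h', hm, hle, hnv'⟩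

theorem mem_frontStep (N : Int) (cs : List Int) (V : PySem.Set Int) :
    ∀ (F : List Int) (m : Int),
      m ∈ frontStep N cs V F ↔ ∃ s ∈ F, ∃ t ∈ cs, m = s + t ∧ m ≤ N ∧ m ∉ V := by
  have key : ∀ (F : List Int) (acc : PySem.Set Int) (m : Int),
      (m ∈ F.foldl
        (fun acc s =>
          cs.foldl
            (fun acc t =>
              if s + t ≤ N ∧ ¬ PySem.Set.contains V (s + t) then PySem.Set.add acc (s + t)
              else acc)
            acc)
        acc) ↔ m ∈ acc ∨ ∃ s ∈ F, ∃ t ∈ cs, m = s + t ∧ m ≤ N ∧ m ∉ V := by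
    intro F
    induction F with
    | nil => intro acc m; simp
    | cons s rest ih =>
        intro acc m
        rw [List.foldl_cons, ih, mem_innerFold]
        constructor
        · rintro (⟨h | ⟨t, ht, hrest⟩⟩ | ⟨s', hs', hrest⟩)
          · exact Or.inl h
          · exact Or.inr ⟨s, by simp, t, ht, hrest⟩
          · exact Or.inr ⟨s', by simp [hs'], hrest⟩
        · rintro (h | ⟨s', hs', t, ht, hrest⟩)
          · exact Or.inl (Or.inl h)
          · rcases List.mem_cons.mp hs' with h' | h'
            · exact Or.inl (Or.inr ⟨t, ht, h' ▸ hrest⟩)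
            · exact Or.inr ⟨s', h', t, ht, hrest⟩
  intro F m
  unfold frontStep
  rw [key]
  simp

/-- The new frontier is exactly the set of sums whose minimum coin count is `dd + 1`. -/
theorem frontier_step (N : Int) (cs : List Int) (hp : PosC cs) (dd : Nat)
    (V F : PySem.Set Int)
    (hV : ∀ m : Int, m ∈ V ↔ 0 ≤ m ∧ m ≤ N ∧ Reach cs dd m)
    (hF : ∀ m : Int, m ∈ F ↔ 0 ≤ m ∧ m ≤ N ∧ Reach cs dd m ∧ ∀ e, e < dd → ¬ Reach cs e m) :
    ∀ m : Int, m ∈ frontStep N cs V F ↔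
      0 ≤ m ∧ m ≤ N ∧ Reach cs (dd + 1) m ∧ ∀ e, e < dd + 1 → ¬ Reach cs e m := by
  intro m
  rw [mem_frontStep]
  constructor
  · rintro ⟨s, hs, t, ht, rfl, hle, hnv⟩
    obtain ⟨hs0, hsN, ⟨l, ⟨hlcs, hlsum⟩, hllen⟩, _⟩ := (hF s).mp hs
    have ht1 : 1 ≤ t := hp t ht
    have hm0 : 0 ≤ s + t := by omega
    have hreach : Reach cs (dd + 1) (s + t) :=
      ⟨t :: l, ⟨fun x hx => by
          rcases List.mem_cons.mp hx with h | h
          · exact h ▸ ht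
          · exact hlcs x h, by rw [List.sum_cons, hlsum]; ring⟩,
        by simp; omega⟩
    refine ⟨hm0, hle, hreach, ?_⟩
    intro e he hre
    have : Reach cs dd (s + t) := reach_mono (by omega) hre
    exact hnv ((hV (s + t)).mpr ⟨hm0, hle, this⟩)
  · rintro ⟨hm0, hmN, ⟨l, ⟨hlcs, hlsum⟩, hllen⟩, hmin⟩
    have hnd : ¬ Reach cs dd m := hmin dd (by omega)
    obtain ⟨t, l', rfl⟩ : ∃ t l', l = t :: l' := by
      cases l with
      | nil =>
          exfalso
          exact hnd ⟨[], ⟨by simp, by simpa using hlsum⟩, by simp⟩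
      | cons t l' => exact ⟨t, l', rfl⟩
    have ht : t ∈ cs := hlcs t List.mem_cons_self
    have ht1 : 1 ≤ t := hp t ht
    have hl'cs : ∀ x ∈ l', x ∈ cs := fun x hx => hlcs x (List.mem_cons_of_mem _ hx)
    have hl'sum : l'.sum = m - t := by
      rw [List.sum_cons] at hlsum; omega
    have hs0 : 0 ≤ l'.sum :=
      List.sum_nonneg (fun x hx => le_trans (by norm_num) (hp x (hl'cs x hx)))
    have hsreach : Reach cs dd (m - t) :=
      ⟨l', ⟨hl'cs, hl'sum⟩, by simp at hllen; omega⟩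
    have hsF : (m - t) ∈ F := by
      rw [hF]
      refine ⟨by omega, by omega, hsreach, ?_⟩
      intro e he hre
      obtain ⟨l'', ⟨hl''cs, hl''sum⟩, hl''len⟩ := hre
      refine hmin (e + 1) (by omega) ⟨t :: l'', ⟨fun x hx => ?_, ?_⟩, by simp; omega⟩
      · rcases List.mem_cons.mp hx with h | h
        · exact h ▸ ht
        · exact hl''cs x h
      · rw [List.sum_cons, hl''sum]; ring
    refine ⟨m - t, hsF, t, ht, by ring, hmN, ?_⟩
    intro hmv
    exact hnd ((hV m).mp hmv).2.2

theorem bfsLoop_eq (N : Int) (cs : List Int) (V F : PySem.Set Int) (d : Int) (fuel : Nat) :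
    bfsLoop N cs V F d fuel =
      if PySem.Set.contains V N then d
      else
        match fuel with
        | 0 => d
        | fuel' + 1 =>
            bfsLoop N cs (PySem.Set.union V (frontStep N cs V F)) (frontStep N cs V F)
              (d + 1) fuel' := by
  rw [bfsLoop.eq_def]

theorem bfs_ok (N v : Int) (cs : List Int) (hN : 0 ≤ N) (hp : PosC cs)
    (hb : Best cs N v) :
    ∀ (fuel dd : Nat) (V F : PySem.Set Int),
      (∀ m : Int, m ∈ V ↔ 0 ≤ m ∧ m ≤ N ∧ Reach cs dd m) →
      (∀ m : Int, m ∈ F ↔ 0 ≤ m ∧ m ≤ N ∧ Reach cs dd m ∧ ∀ e, e < dd → ¬ Reach cs e m) →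
      (dd : Int) ≤ v → v ≤ (dd : Int) + (fuel : Int) →
      bfsLoop N cs V F (dd : Int) fuel = v := by
  intro fuel
  induction fuel with
  | zero =>
      intro dd V F hV hF hd1 hd2
      have hvd : v = (dd : Int) := by push_cast at hd2; omega
      have hreach : Reach cs dd N := (best_reach_iff hb dd).mpr (by omega)
      have hcon : PySem.Set.contains V N = true :=
        (PySem.Set.contains_iff V N).mpr ((hV N).mpr ⟨hN, le_rfl, hreach⟩)
      rw [bfsLoop_eq, if_pos hcon]
      omega
  | succ n ih =>
      intro dd V F hV hF hd1 hd2
      by_cases hcon : PySem.Set.contains V N = true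
      · rw [bfsLoop_eq, if_pos hcon]
        have hreach : Reach cs dd N := ((hV N).mp ((PySem.Set.contains_iff V N).mp hcon)).2.2
        have := (best_reach_iff hb dd).mp hreach
        omega
      · rw [bfsLoop_eq, if_neg hcon]
        have hnr : ¬ Reach cs dd N := by
          intro hr
          exact hcon ((PySem.Set.contains_iff V N).mpr ((hV N).mpr ⟨hN, le_rfl, hr⟩))
        have hdv : (dd : Int) < v := by
          have := (best_reach_iff hb dd).mpr
          by_contra h
          exact hnr (this (by omega))
        have hF' := frontier_step N cs hp dd V F hV hF
        have hV' : ∀ m : Int,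
            m ∈ PySem.Set.union V (frontStep N cs V F) ↔
              0 ≤ m ∧ m ≤ N ∧ Reach cs (dd + 1) m := by
          intro m
          rw [PySem.Set.mem_union, hV, hF']
          constructor
          · rintro (⟨h0, hN', hr⟩ | ⟨h0, hN', hr, _⟩)
            · exact ⟨h0, hN', reach_mono (by omega) hr⟩
            · exact ⟨h0, hN', hr⟩
          · rintro ⟨h0, hN', hr⟩
            by_cases hd : Reach cs dd m
            · exact Or.inl ⟨h0, hN', hd⟩
            · refine Or.inr ⟨h0, hN', hr, ?_⟩
              intro e he hre
              exact hd (reach_mono (by omega) hre)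
        have := ih (dd + 1) _ _ hV' hF' (by push_cast; omega) (by push_cast at hd2 ⊢; omega)
        rw [show ((dd : Int) + 1) = (((dd + 1 : Nat)) : Int) by push_cast; ring]
        exact this

-- A's inner relaxation sweep, start generalized (identical lambda to innerA's)
def aloop (N j a : Int) (dp : List Int) : List Int :=
  (PySem.List.pyRange a (N + 1) 1).foldl
    (fun d k =>
      PySem.List.pySetD d k (min (PySem.List.pyGetD d k 0) (PySem.List.pyGetD d (k - j) 0 + 1)))
    dp

theorem innerA_eq_aloop (N j : Int) (dp : List Int) : innerA N j dp = aloop N j j dp := rfl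

theorem aloop_nil (N j a : Int) (dp : List Int) (h : N + 1 ≤ a) : aloop N j a dp = dp := by
  unfold aloop
  rw [PySem.List.pyRange_one_eq_nil h]
  rfl

theorem aloop_cons (N j a : Int) (dp : List Int) (h : a < N + 1) :
    aloop N j a dp = aloop N j (a + 1)
      (PySem.List.pySetD dp a
        (min (PySem.List.pyGetD dp a 0) (PySem.List.pyGetD dp (a - j) 0 + 1))) := by
  unfold aloop
  rw [PySem.List.pyRange_one_cons h, List.foldl_cons]

theorem aloop_ok (N t : Int) (S : List Int) (hp : PosC S) (ht : 1 ≤ t) :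
    ∀ (r : Nat) (K : Int) (dp : List Int), (N + 1 - K).toNat ≤ r → t ≤ K →
      dp.length = N.toNat + 1 →
      (∀ m : Nat, m < dp.length →
        ((m : Int) < K → Best (t :: S) (m : Int) (dp.getD m 0)) ∧
        (K ≤ (m : Int) → Best S (m : Int) (dp.getD m 0))) →
      (aloop N t K dp).length = N.toNat + 1 ∧
      ∀ m : Nat, m < N.toNat + 1 → Best (t :: S) (m : Int) ((aloop N t K dp).getD m 0) := by
  intro r
  induction r with
  | zero =>
      intro K dp hr htK hlen hbest
      rw [aloop_nil _ _ _ _ (by omega)]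
      exact ⟨hlen, fun m hm => (hbest m (by omega)).1 (by omega)⟩
  | succ n ih =>
      intro K dp hr htK hlen hbest
      by_cases hend : N + 1 ≤ K
      · rw [aloop_nil _ _ _ _ hend]
        exact ⟨hlen, fun m hm => (hbest m (by omega)).1 (by omega)⟩
      · push_neg at hend
        rw [aloop_cons _ _ _ _ (by omega)]
        have h0K : 0 ≤ K := by omega
        have hKlt : K.toNat < dp.length := by omega
        have ha : PySem.List.pyGetD dp K 0 = dp.getD K.toNat 0 := by
          rw [PySem.List.pyGetD_eq_getElem dp 0 h0K (by omega),
            List.getD_eq_getElem dp 0 hKlt]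
        have hKtlt : (K - t).toNat < dp.length := by omega
        have hb : PySem.List.pyGetD dp (K - t) 0 = dp.getD (K - t).toNat 0 := by
          rw [PySem.List.pyGetD_eq_getElem dp 0 (by omega) (by omega),
            List.getD_eq_getElem dp 0 hKtlt]
        have hBa : Best S K (PySem.List.pyGetD dp K 0) := by
          rw [ha]
          have := (hbest K.toNat hKlt).2 (by omega)
          rwa [Int.toNat_of_nonneg h0K] at this
        have hBb : Best (t :: S) (K - t) (PySem.List.pyGetD dp (K - t) 0) := by
          rw [hb]
          have := (hbest (K - t).toNat hKtlt).1 (by omega)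
          rwa [Int.toNat_of_nonneg (by omega)] at this
        have hbK : Best (t :: S) K
            (min (PySem.List.pyGetD dp K 0) (PySem.List.pyGetD dp (K - t) 0 + 1)) :=
          best_step hp ht hBa hBb
        set v := min (PySem.List.pyGetD dp K 0) (PySem.List.pyGetD dp (K - t) 0 + 1) with hv
        have hset : PySem.List.pySetD dp K v = dp.set K.toNat v :=
          PySem.List.pySetD_of_nonneg dp v h0K
        rw [hset]
        have hlen₂ : (dp.set K.toNat v).length = N.toNat + 1 := by
          rw [List.length_set]; exact hlen
        refine ih (K + 1) _ (by omega) (by omega) hlen₂ ?_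
        intro m hm
        rw [List.length_set] at hm
        constructor
        · intro hmK
          by_cases hmeq : m = K.toNat
          · subst hmeq
            rw [List.getD_eq_getElem _ 0 (by rw [List.length_set]; omega),
              List.getElem_set_self (by rw [List.length_set]; omega)]
            have hc : ((K.toNat : Nat) : Int) = K := Int.toNat_of_nonneg h0K
            rw [hc]
            exact hbK
          · rw [List.getD_eq_getElem _ 0 (by rw [List.length_set]; omega),
              List.getElem_set_ne (by omega) (by rw [List.length_set]; omega),
              ← List.getD_eq_getElem dp 0 hm]
            exact (hbest m hm).1 (by omega)
        · intro hmK
          have hmeq : m ≠ K.toNat := by omega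
          rw [List.getD_eq_getElem _ 0 (by rw [List.length_set]; omega),
            List.getElem_set_ne (by omega) (by rw [List.length_set]; omega),
            ← List.getD_eq_getElem dp 0 hm]
          exact (hbest m hm).2 (by omega)

theorem innerA_ok (N t : Int) (S : List Int) (hp : PosC S) (ht : 1 ≤ t) (htN : t ≤ N)
    (dp : List Int) (hlen : dp.length = N.toNat + 1)
    (hbest : ∀ m : Nat, m < dp.length → Best S (m : Int) (dp.getD m 0)) :
    (innerA N t dp).length = N.toNat + 1 ∧
    ∀ m : Nat, m < N.toNat + 1 → Best (t :: S) (m : Int) ((innerA N t dp).getD m 0) := by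
  rw [innerA_eq_aloop]
  refine aloop_ok N t S hp ht (N + 1 - t).toNat t dp le_rfl le_rfl hlen ?_
  intro m hm
  refine ⟨fun hmt => ?_, fun _ => hbest m hm⟩
  exact best_skip hp ht hmt (hbest m hm)

theorem loopA_cons (N : Int) (dp : List Int) (j h : Int) (rest : List Int) :
    loopA N dp j (h :: rest) =
      if N < j + PySem.Int.floordiv ((h + 1) * h) 2 then dp
      else loopA N (innerA N (j + PySem.Int.floordiv ((h + 1) * h) 2) dp)
        (j + PySem.Int.floordiv ((h + 1) * h) 2) rest := rfl

theorem tetNat_cast_succ (hh : Nat) :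
    (tetNat (hh + 1) : Int) = (tetNat hh : Int) + (triN (hh + 1) : Int) := by
  simp [tetNat]

theorem tet_break (N : Int) (hNd : N ≤ 2147483648) : N < (tetNat 46342 : Int) := by
  have h := tet_ge_sq 46342
  have h2 : (2147580964 : Nat) ≤ tetNat 46342 := by omega
  have h3 : (2147580964 : Int) ≤ (tetNat 46342 : Int) := by exact_mod_cast h2
  omega

theorem loopA_ok (N : Int) (hN : 0 ≤ N) (hNd : N ≤ 2147483648) :
    ∀ (fuel : Nat) (hh : Nat) (dp : List Int) (S : List Int),
      hh + fuel = 46341 →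
      PosC S →
      dp.length = N.toNat + 1 →
      (∀ m : Nat, m < dp.length → Best S (m : Int) (dp.getD m 0)) →
      (loopA N dp (tetNat hh : Int) (PySem.List.pyRange ((hh : Int) + 1) 300000 1)).length
          = N.toNat + 1 ∧
      ∀ m : Nat, m < N.toNat + 1 →
        Best (S ++ tetListAux N (tetNat hh) hh) (m : Int)
          ((loopA N dp (tetNat hh : Int) (PySem.List.pyRange ((hh : Int) + 1) 300000 1)).getD m 0) := by
  intro fuel
  induction fuel with
  | zero =>
      intro hh dp S hfuel hpS hlen hbest
      have hhh : hh = 46341 := by omega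
      subst hhh
      rw [PySem.List.pyRange_one_cons (by norm_num), loopA_cons]
      rw [flrA 46341]
      have hbr : N < (tetNat 46341 : Int) + (triN (46341 + 1) : Int) := by
        rw [← tetNat_cast_succ]
        exact tet_break N hNd
      rw [if_pos hbr]
      have htl : tetListAux N (tetNat 46341 : Int) 46341 = [] := by
        rw [tetListAux_eq, if_pos hbr]
      rw [htl]
      exact ⟨hlen, fun m hm => by simpa using hbest m (by omega)⟩
  | succ n ih =>
      intro hh dp S hfuel hpS hlen hbest
      rw [PySem.List.pyRange_one_cons (by omega), loopA_cons, flrA hh]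
      by_cases hbr : N < (tetNat hh : Int) + (triN (hh + 1) : Int)
      · rw [if_pos hbr]
        have htl : tetListAux N (tetNat hh : Int) hh = [] := by
          rw [tetListAux_eq, if_pos hbr]
        rw [htl]
        exact ⟨hlen, fun m hm => by simpa using hbest m (by omega)⟩
      · rw [if_neg hbr]
        push_neg at hbr
        set j' : Int := (tetNat hh : Int) + (triN (hh + 1) : Int) with hj'
        have hj'c : j' = (tetNat (hh + 1) : Int) := (tetNat_cast_succ hh).symm
        have hj'1 : 1 ≤ j' := by
          rw [hj'c]; exact_mod_cast tetNat_pos hh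
        obtain ⟨hlen₂, hbest₂⟩ := innerA_ok N j' S hpS hj'1 hbr dp hlen hbest
        have hpS' : PosC (S ++ [j']) := by
          intro x hx
          rcases List.mem_append.mp hx with h | h
          · exact hpS x h
          · simp at h; omega
        have hbest₂' : ∀ m : Nat, m < (innerA N j' dp).length →
            Best (S ++ [j']) (m : Int) ((innerA N j' dp).getD m 0) := by
          intro m hm
          refine best_congr (fun x => ?_) (hbest₂ m (by omega))
          simp [or_comm]
        have hrec := ih (hh + 1) (innerA N j' dp) (S ++ [j']) (by omega) hpS' hlen₂ hbest₂'
        have hcast2 : ((hh : Int) + 1) + 1 = ((hh + 1 : Nat) : Int) + 1 := by push_cast; ring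
        rw [hj'c, hcast2]
        refine ⟨hrec.1, fun m hm => ?_⟩
        refine best_congr (fun x => ?_) (hrec.2 m hm)
        have htl : tetListAux N (tetNat hh : Int) hh
            = j' :: tetListAux N (tetNat (hh + 1) : Nat) (hh + 1) := by
          rw [tetListAux_eq, if_neg (by omega), ← hj', hj'c]
        rw [htl, hj'c]
        simp [List.mem_append, List.mem_cons]

theorem sum_ones : ∀ (l : List Int), (∀ x ∈ l, x = 1) → l.sum = (l.length : Int)
  | [], _ => by simp
  | a :: l, h => by
      have ha : a = 1 := h a (by simp)
      have hl := sum_ones l (fun x hx => h x (by simp [hx]))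
      rw [List.sum_cons, ha, hl]
      simp only [List.length_cons]
      push_cast
      ring

theorem best_one (m : Nat) : Best [(1 : Int)] (m : Int) (m : Int) := by
  constructor
  · refine ⟨List.replicate m 1, ⟨fun x hx => ?_, ?_⟩, by simp⟩
    · rw [List.eq_of_mem_replicate hx]; simp
    · simp
  · rintro l ⟨hl, hs⟩
    have hones : ∀ x ∈ l, x = (1 : Int) := fun x hx => by simpa using hl x hx
    have := sum_ones l hones
    omega

theorem solve_best (N : Int) (hN : 0 ≤ N) (hNd : N ≤ 2147483648) :
    Best ((1 : Int) :: tetListAux N 0 0) N (solve N) := by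
  have hdp0len : (PySem.List.pyRange 0 (N + 1) 1).length = N.toNat + 1 := by
    rw [PySem.List.length_pyRange_one]; omega
  have hbest0 : ∀ m : Nat, m < (PySem.List.pyRange 0 (N + 1) 1).length →
      Best [(1 : Int)] (m : Int) ((PySem.List.pyRange 0 (N + 1) 1).getD m 0) := by
    intro m hm
    rw [List.getD_eq_getElem _ 0 hm, PySem.List.getElem_pyRange_one]
    simpa using best_one m
  have h := loopA_ok N hN hNd 46341 0 (PySem.List.pyRange 0 (N + 1) 1) [1] (by omega)
      (by intro x hx; simp at hx; omega) hdp0len hbest0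
  norm_num [show tetNat 0 = 0 from rfl] at h
  obtain ⟨hlen', hb'⟩ := h
  rw [show solve N = (PySem.List.pyGet? (loopA N (PySem.List.pyRange 0 (N + 1) 1) 0
      (PySem.List.pyRange 1 300000 1)) N).getD 0 from rfl]
  rw [PySem.List.pyGet?_of_nonneg _ hN]
  have hb := hb' N.toNat le_rfl
  rw [Int.toNat_of_nonneg hN] at hb
  exact hb

theorem best_le_self {cs : List Int} {N v : Int} (h1 : (1 : Int) ∈ cs) (hN : 0 ≤ N)
    (hb : Best cs N v) : v ≤ N := by
  have hrep : RepL cs N (List.replicate N.toNat 1) := by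
    refine ⟨fun x hx => ?_, ?_⟩
    · rw [List.eq_of_mem_replicate hx]; exact h1
    · simp [List.sum_replicate]; omega
  have := hb.2 _ hrep
  simp at this
  omega

theorem solve_alt_eq (N : Int) :
    solve_alt N =
      bfsLoop N (tetListAux N 0 0) (PySem.Set.ofList [0]) (PySem.Set.ofList [0]) 0 N.toNat :=
  rfl

theorem solve_alt_best (N v : Int) (hN : 1 ≤ N) (hb : Best (tetListAux N 0 0) N v) :
    solve_alt N = v := by
  have hp := tet_posC N
  have h1 : (1 : Int) ∈ tetListAux N 0 0 := by
    rw [tet_head N hN]; exact List.mem_cons_self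
  have hv0 : 0 ≤ v := by
    obtain ⟨⟨l, _, hlen⟩, _⟩ := hb
    omega
  have hvN : v ≤ N := best_le_self h1 (by omega) hb
  have hV0 : ∀ m : Int, m ∈ PySem.Set.ofList [(0 : Int)] ↔
      0 ≤ m ∧ m ≤ N ∧ Reach (tetListAux N 0 0) 0 m := by
    intro m
    rw [PySem.Set.mem_ofList]
    constructor
    · intro hm
      simp at hm
      subst hm
      exact ⟨le_rfl, by omega, ⟨[], ⟨by simp, by simp⟩, by simp⟩⟩
    · rintro ⟨h0, hN', ⟨l, ⟨_, hsum⟩, hlen⟩⟩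
      have : l = [] := List.eq_nil_of_length_eq_zero (by omega)
      subst this
      simp at hsum
      simp [hsum.symm]
  have hF0 : ∀ m : Int, m ∈ PySem.Set.ofList [(0 : Int)] ↔
      0 ≤ m ∧ m ≤ N ∧ Reach (tetListAux N 0 0) 0 m ∧
        ∀ e, e < 0 → ¬ Reach (tetListAux N 0 0) e m := by
    intro m
    rw [hV0 m]
    constructor
    · rintro ⟨h0, hN', hr⟩
      exact ⟨h0, hN', hr, fun e he => by omega⟩
    · rintro ⟨h0, hN', hr, _⟩
      exact ⟨h0, hN', hr⟩
  rw [solve_alt_eq]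
  have := bfs_ok N v (tetListAux N 0 0) (by omega) hp hb N.toNat 0
    (PySem.Set.ofList [0]) (PySem.Set.ofList [0]) hV0 hF0 (by simpa using hv0)
    (by push_cast; omega)
  simpa using this

theorem solve_alt_zero : solve_alt 0 = 0 := by
  rw [solve_alt_eq, bfsLoop_eq]
  rw [if_pos (by decide)]

-- ===== VERDICT (by name: the statement is the Claim_ definition above) =====
theorem solve_spec : Claim_equal_solve := by
  intro N hdom hpre
  unfold Spec_solve
  have hNd : N ≤ 2147483648 := by
    unfold Dom_solve pvDomInt at hdom
    simpa using (of_decide_eq_true hdom).2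
  have hN : 0 ≤ N := hpre
  have hA := solve_best N hN hNd
  by_cases h0 : N = 0
  · subst h0
    rw [solve_alt_zero]
    exact best_unique hA (best_zero _)
  · have hN1 : 1 ≤ N := by omega
    have h1 : (1 : Int) ∈ tetListAux N 0 0 := by
      rw [tet_head N hN1]; exact List.mem_cons_self
    have hA' : Best (tetListAux N 0 0) N (solve N) :=
      best_congr (fun x => ⟨fun hx => by
        rcases List.mem_cons.mp hx with h | h
        · rw [h]; exact h1
        · exact h, fun hx => List.mem_cons_of_mem _ hx⟩) hA
    exact (solve_alt_best N (solve N) hN1 hA').symm
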